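-- pv_equiv track=rewrite | github.com/timtronic477/codewars | SevenAte9.py | seven_ate9
-- ===== SOURCE A (Python) =====
-- def seven_ate9(str_):
--     s = list(str_)
--     f = []
--     for i in range(0, len(s)):
--         if s[i] != "9":
--             f.append(s[i])
--         else:
--             if i != 0 and i != (len(s)-1):
--                 if s[i-1] =="7"and s[i+1] == "7":
--                     pass
--                 else:
--                     f.append(s[i])
--             else:
--                 f.append(s[i])
--     return "".join(f)
-- ===== SOURCE B (Python) =====
-- def seven_ate9(str_):
--     # Pattern-consuming scan: eat seven-nine-seven matches, emitting the seven and reusing the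
--     # trailing seven as the next window's head, instead of testing every char
--     # against its neighbours by index.
--     out = []
--     i = 0
--     n = len(str_)
--     while i < n:
--         if str_[i:i + 3] == "797":
--             out.append("7")
--             i += 2  # the trailing '7' becomes the new head
--         else:
--             out.append(str_[i])
--             i += 1
--     return "".join(out)
-- ===== Notes on version B (the rewrite author's own statement) =====
-- stated objective: alternative
-- what changed: Replaces the per-index neighbour test (look at both neighbours of every char by index) with a pattern-consuming left-to-right scan that eats seven-nine-seven matches, advancing by two and reusing the shared trailing seven as the next window head.
import Mathlib
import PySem

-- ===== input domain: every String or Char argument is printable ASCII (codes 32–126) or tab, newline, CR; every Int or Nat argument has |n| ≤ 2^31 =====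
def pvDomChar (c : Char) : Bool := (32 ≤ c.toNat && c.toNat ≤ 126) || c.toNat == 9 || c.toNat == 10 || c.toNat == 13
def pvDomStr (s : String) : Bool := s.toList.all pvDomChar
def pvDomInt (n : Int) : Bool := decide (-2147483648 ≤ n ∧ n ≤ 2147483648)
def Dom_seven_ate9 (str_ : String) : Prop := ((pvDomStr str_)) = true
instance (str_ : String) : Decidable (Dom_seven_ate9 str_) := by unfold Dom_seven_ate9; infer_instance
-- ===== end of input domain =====

-- B replaces A's per-index neighbour test by a pattern-consuming scan that eats
-- seven-nine-seven matches (alternative decomposition, same cost); equivalence is proved below.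

-- ===== PORT A =====
-- literal port of A: for i in range(0, len(s)) appending to f, with the nested if-chain
def seven_ate9 (str_ : String) : String :=
  let s : List Char := str_.toList
  let f : List Char :=
    (PySem.List.pyRange 0 (s.length : Int) 1).foldl
      (fun f i =>
        if PySem.List.pyGetD s i ' ' ≠ '9' then
          f ++ [PySem.List.pyGetD s i ' ']
        else
          if i ≠ 0 ∧ i ≠ (s.length : Int) - 1 then
            if PySem.List.pyGetD s (i - 1) ' ' = '7' ∧ PySem.List.pyGetD s (i + 1) ' ' = '7' then
              f
            else
              f ++ [PySem.List.pyGetD s i ' ']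
          else
            f ++ [PySem.List.pyGetD s i ' '])
      []
  String.ofList f

-- ===== PORT B =====
-- Source B's while-loop: the remaining characters str_[i:] are the recursion argument;
-- the three-char slice comparison is the three-head pattern test, i += 2 keeps the trailing seven.
def sevenAte9Go : List Char → List Char
  | [] => []
  | c :: rest =>
    if h : c = '7' ∧ rest.head? = some '9' ∧ rest.tail.head? = some '7' then
      '7' :: sevenAte9Go ('7' :: rest.tail.tail)
    else
      c :: sevenAte9Go rest
termination_by l => l.length
decreasing_by
  · cases rest with
    | nil => simp at h
    | cons b t =>
      cases t with
      | nil => simp at h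
      | cons b2 t2 => simp
  · simp

def seven_ate9_alt (str_ : String) : String :=
  String.ofList (sevenAte9Go str_.toList)

-- ===== PRECONDITION & SPEC =====
def Spec_seven_ate9 (str_ : String) (out : String) : Prop := out = seven_ate9_alt str_
instance (str_ : String) (out : String) : Decidable (Spec_seven_ate9 str_ out) := by unfold Spec_seven_ate9; infer_instance

-- ===== CLAIM (what is proved, stated in full; the proofs are below) =====
def Claim_equal_seven_ate9 : Prop := ∀ (str_ : String), Dom_seven_ate9 str_ → Spec_seven_ate9 str_ (seven_ate9 str_)

-- ===== LEMMAS AND PROOFS =====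

-- the common middle form: keep a char unless it is '9' with previous char p = '7'
-- and the next char '7'
def nfStep (p : Option Char) : List Char → List Char
  | [] => []
  | c :: rest =>
      (if c = '9' ∧ p = some '7' ∧ rest.head? = some '7' then [] else [c]) ++ nfStep (some c) rest

-- what A's loop body emits at absolute index i of t
def payload (t : List Char) (i : Int) : List Char :=
  if PySem.List.pyGetD t i ' ' ≠ '9' then [PySem.List.pyGetD t i ' ']
  else if i ≠ 0 ∧ i ≠ (t.length : Int) - 1 then
    if PySem.List.pyGetD t (i - 1) ' ' = '7' ∧ PySem.List.pyGetD t (i + 1) ' ' = '7' then []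
    else [PySem.List.pyGetD t i ' ']
  else [PySem.List.pyGetD t i ' ']

theorem payload_at (pre s : List Char) (c : Char) :
    payload (pre ++ c :: s) (pre.length : Int) =
      if c = '9' ∧ pre.getLast? = some '7' ∧ s.head? = some '7' then [] else [c] := by
  have hget : PySem.List.pyGetD (pre ++ c :: s) (pre.length : Int) ' ' = c := by
    rw [PySem.List.pyGetD_natCast]
    simp [List.getD]
  have hlen : ((pre ++ c :: s).length : Int) = (pre.length : Int) + (s.length : Int) + 1 := by
    simp; omega
  by_cases hc : c = '9'
  · subst hc
    simp only [payload, hget, ne_eq, not_true_eq_false, if_false, hlen]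
    by_cases h0 : pre = []
    · subst h0
      simp
    · have hpl : 0 < pre.length := List.length_pos_iff.mpr h0
      by_cases hs : s = []
      · subst hs
        have : ¬((pre.length : Int) ≠ 0 ∧ (pre.length : Int) ≠ (pre.length : Int) + 0 + 1 - 1) := by
          intro h; omega
        simp only [List.length_nil, Nat.cast_zero, this, if_false]
        simp
      · have hsl : 0 < s.length := List.length_pos_iff.mpr hs
        have hcond : ((pre.length : Int) ≠ 0 ∧ (pre.length : Int) ≠ (pre.length : Int) + (s.length : Int) + 1 - 1) := by
          constructor <;> omega
        rw [if_pos hcond]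
        have hprev : PySem.List.pyGetD (pre ++ '9' :: s) ((pre.length : Int) - 1) ' ' =
            pre.getLast (by exact h0) := by
          have : (pre.length : Int) - 1 = ((pre.length - 1 : Nat) : Int) := by omega
          rw [this, PySem.List.pyGetD_natCast]
          have hlt : pre.length - 1 < pre.length := by omega
          simp [List.getD, List.getElem?_append_left hlt, List.getElem?_eq_getElem hlt,
            List.getLast_eq_getElem]
        have hnext : PySem.List.pyGetD (pre ++ '9' :: s) ((pre.length : Int) + 1) ' ' =
            s.getD 0 ' ' := by
          have : (pre.length : Int) + 1 = ((pre.length + 1 : Nat) : Int) := by omega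
          rw [this, PySem.List.pyGetD_natCast]
          have : pre.length ≤ pre.length + 1 := by omega
          simp [List.getD, List.getElem?_append_right this]
        rw [hprev, hnext]
        rw [List.getLast?_eq_some_getLast h0]
        have hhead : s.head? = some (s.getD 0 ' ') := by
          cases s with
          | nil => exact absurd rfl hs
          | cons a t => simp [List.getD]
        rw [hhead]
        by_cases h7 : pre.getLast h0 = '7' ∧ s.getD 0 ' ' = '7'
        · rw [if_pos h7, if_pos (by exact ⟨by simp, by simp [h7.1], by simpa [List.getD] using h7.2⟩)]
        · rw [if_neg h7, if_neg]
          intro ⟨_, hp, hn⟩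
          exact h7 ⟨by injection hp, by injection hn⟩
  · simp [payload, hget, hc]

theorem flatMap_payload (s : List Char) : ∀ (pre : List Char),
    (List.range s.length).flatMap (fun k => payload (pre ++ s) ((pre.length + k : Nat) : Int)) =
      nfStep pre.getLast? s := by
  induction s with
  | nil => intro pre; simp [nfStep]
  | cons c rest ih =>
    intro pre
    rw [List.length_cons, List.range_succ_eq_map]
    simp only [List.flatMap_cons, Nat.add_zero]
    have h1 : (List.map Nat.succ (List.range rest.length)).flatMap
        (fun k => payload (pre ++ c :: rest) ((pre.length + k : Nat) : Int)) =
        (List.range rest.length).flatMap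
        (fun k => payload ((pre ++ [c]) ++ rest) (((pre ++ [c]).length + k : Nat) : Int)) := by
      rw [List.flatMap_map]
      apply List.flatMap_congr
      intro k _
      have e1 : pre ++ c :: rest = (pre ++ [c]) ++ rest := by simp
      have e2 : pre.length + Nat.succ k = (pre ++ [c]).length + k := by simp; omega
      rw [e1, e2]
    rw [h1, ih (pre ++ [c])]
    have h2 : payload (pre ++ c :: rest) (pre.length : Int) =
        if c = '9' ∧ pre.getLast? = some '7' ∧ rest.head? = some '7' then [] else [c] :=
      payload_at pre rest c
    rw [h2]
    have h3 : (pre ++ [c]).getLast? = some c := by simp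
    rw [h3, nfStep]

-- compatibility condition under which B's scanner agrees with the middle form
def nfOk (p : Option Char) (l : List Char) : Prop :=
  ¬(p = some '7' ∧ l.head? = some '9' ∧ l.tail.head? = some '7')

theorem go_eq_nfStep : ∀ (l : List Char) (p : Option Char), nfOk p l →
    sevenAte9Go l = nfStep p l := by
  intro l
  induction l using sevenAte9Go.induct with
  | case1 =>
    intro p _
    rw [sevenAte9Go, nfStep]
  | case2 c rest h ih =>
    intro p _
    obtain ⟨hc, h9, h7⟩ := h
    subst hc
    cases rest with
    | nil => simp at h9
    | cons b t =>
      simp only [List.head?_cons, Option.some.injEq] at h9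
      subst h9
      cases t with
      | nil => simp at h7
      | cons b2 t2 =>
        simp only [List.tail_cons, List.head?_cons, Option.some.injEq] at h7
        subst h7
        simp only [List.tail_cons] at ih
        rw [sevenAte9Go]
        rw [dif_pos (by simp)]
        simp only [List.tail_cons]
        rw [ih (some '9') (by simp [nfOk])]
        simp [nfStep]
  | case3 c rest h ih =>
    intro p hp
    rw [sevenAte9Go]
    rw [dif_neg h]
    rw [nfStep]
    rw [if_neg]
    · rw [ih (some c)]
      · simp
      · unfold nfOk
        intro ⟨hc7, h9, h7⟩
        injection hc7 with hc7
        exact h ⟨hc7, h9, h7⟩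
    · unfold nfOk at hp
      intro ⟨hc9, hp7, hh7⟩
      refine hp ⟨hp7, by simp [hc9], ?_⟩
      simpa using hh7

theorem go_eq_loop (s : List Char) :
    (PySem.List.pyRange 0 (s.length : Int) 1).foldl
      (fun f i =>
        if PySem.List.pyGetD s i ' ' ≠ '9' then
          f ++ [PySem.List.pyGetD s i ' ']
        else
          if i ≠ 0 ∧ i ≠ (s.length : Int) - 1 then
            if PySem.List.pyGetD s (i - 1) ' ' = '7' ∧ PySem.List.pyGetD s (i + 1) ' ' = '7' then
              f
            else
              f ++ [PySem.List.pyGetD s i ' ']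
          else
            f ++ [PySem.List.pyGetD s i ' '])
      [] = sevenAte9Go s := by
  have hstep : ∀ (f : List Char) (i : Int),
      (if PySem.List.pyGetD s i ' ' ≠ '9' then f ++ [PySem.List.pyGetD s i ' ']
       else if i ≠ 0 ∧ i ≠ (s.length : Int) - 1 then
         if PySem.List.pyGetD s (i - 1) ' ' = '7' ∧ PySem.List.pyGetD s (i + 1) ' ' = '7' then f
         else f ++ [PySem.List.pyGetD s i ' ']
       else f ++ [PySem.List.pyGetD s i ' ']) = f ++ payload s i := by
    intro f i
    unfold payload
    split_ifs <;> simp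
  have hfun : (fun (f : List Char) (i : Int) =>
      if PySem.List.pyGetD s i ' ' ≠ '9' then f ++ [PySem.List.pyGetD s i ' ']
      else if i ≠ 0 ∧ i ≠ (s.length : Int) - 1 then
        if PySem.List.pyGetD s (i - 1) ' ' = '7' ∧ PySem.List.pyGetD s (i + 1) ' ' = '7' then f
        else f ++ [PySem.List.pyGetD s i ' ']
      else f ++ [PySem.List.pyGetD s i ' ']) = fun f i => f ++ payload s i := by
    funext f i
    exact hstep f i
  rw [hfun]
  rw [← List.flatMap_eq_foldl]
  rw [PySem.List.pyRange_zero_natCast, List.flatMap_map]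
  have hpay : (List.range s.length).flatMap (fun a : Nat => payload s (a : Int)) =
      (List.range s.length).flatMap
        (fun k => payload (([] : List Char) ++ s) ((([] : List Char).length + k : Nat) : Int)) := by
    apply List.flatMap_congr
    intro k _
    simp
  rw [hpay, flatMap_payload s []]
  rw [go_eq_nfStep s none (by simp [nfOk])]
  rfl

-- ===== VERDICT (by name: the statement is the Claim_ definition above) =====
theorem seven_ate9_spec : Claim_equal_seven_ate9 := by
  intro str_ _
  unfold Spec_seven_ate9 seven_ate9 seven_ate9_alt
  simp only
  rw [go_eq_loop]
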